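-- pv_equiv track=rewrite | github.com/e9kwagh/Project-Euler-math-problems | math029/solution.py | multiply_carry
-- ===== SOURCE A (Python) =====
-- def multiply_carry(num, multiplier, carry):
--     """Multiply"""
--     result = 0
--
--     while num or carry:
--         product = (num % 10) * multiplier + carry
--         result = result * 10 + product % 10
--         carry = product // 10
--         num //= 10
--
--     return result
-- ===== SOURCE B (Python) =====
-- def multiply_carry(num, multiplier, carry):
--     """Multiply: combine into one product, materialise its decimal digits
--     (least-significant first), then fold that list back into the reversed number."""
--     total = num * multiplier + carry
--     digits = []
--     while total:
--         digits.append(total % 10)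
--         total //= 10
--     result = 0
--     for d in digits:
--         result = result * 10 + d
--     return result
-- ===== Notes on version B (the rewrite author's own statement) =====
-- stated objective: alternative
-- what changed: B computes total = num*multiplier + carry in one arithmetic expression, materialises total's decimal digits into a list (least-significant first), and folds that list into the reversed number, instead of A's fused per-digit multiply-with-carry loop driven by num's digits.
-- intended difference: When num >= 1 and the product total = num*multiplier+carry is positive but has fewer decimal digits than num (only reachable with multiplier <= 0 or a large negative carry), A keeps looping over num's remaining digits and returns the digit-reversal padded with trailing zeros (e.g. A(12,0,3)=30), while B returns the plain digit-reversal 3, the intended reverse of the product. — e.g. on multiply_carry(12, 0, 3): A returns 30, B returns 3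
import Mathlib
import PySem

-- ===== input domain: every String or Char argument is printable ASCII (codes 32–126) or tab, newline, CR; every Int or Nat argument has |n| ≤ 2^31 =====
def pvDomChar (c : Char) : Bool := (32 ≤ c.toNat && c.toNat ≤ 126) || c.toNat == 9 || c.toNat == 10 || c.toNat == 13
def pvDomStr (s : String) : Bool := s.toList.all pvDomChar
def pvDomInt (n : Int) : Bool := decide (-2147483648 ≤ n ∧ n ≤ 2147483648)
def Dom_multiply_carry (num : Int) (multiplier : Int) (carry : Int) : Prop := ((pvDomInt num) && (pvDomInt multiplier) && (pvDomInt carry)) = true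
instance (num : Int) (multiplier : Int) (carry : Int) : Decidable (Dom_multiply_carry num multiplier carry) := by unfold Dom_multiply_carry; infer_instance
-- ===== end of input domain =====

-- B replaces A's fused per-digit multiply-with-carry loop by one arithmetic combine (total = num*multiplier+carry),
-- a pass listing total's decimal digits, and a fold re-assembling them reversed (objective: alternative);
-- return value only, no mutation.

-- ===== PORT A =====
-- A's while loop; the fuel (64) exceeds the loop's iteration count on every terminating input with |args| ≤ 2^31
-- (≤ 19 iterations); on non-terminating inputs (excluded by Pre_) Python A diverges.
def mcA_loop : Nat → Int → Int → Int → Int → Int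
  | 0, _, _, _, result => result
  | fuel+1, num, multiplier, carry, result =>
    if num ≠ 0 ∨ carry ≠ 0 then
      let product := (PySem.Int.mod num 10) * multiplier + carry
      mcA_loop fuel (PySem.Int.floordiv num 10) multiplier
        (PySem.Int.floordiv product 10) (result * 10 + PySem.Int.mod product 10)
    else result

def multiply_carry (num : Int) (multiplier : Int) (carry : Int) : Int :=
  mcA_loop 64 num multiplier carry 0

-- ===== PORT B =====
-- B's first while loop: the list of total's decimal digits, least significant first
-- (same fuel remark as A's loop: on negative totals, excluded by Pre_, Python B diverges).
def mcB_digits : Nat → Int → List Int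
  | 0, _ => []
  | fuel+1, total =>
    if total ≠ 0 then
      PySem.Int.mod total 10 :: mcB_digits fuel (PySem.Int.floordiv total 10)
    else []

-- B's second pass: the for loop over digits is a left fold with accumulator result.
def multiply_carry_alt (num : Int) (multiplier : Int) (carry : Int) : Int :=
  (mcB_digits 64 (num * multiplier + carry)).foldl (fun result d => result * 10 + d) 0

-- ===== PRECONDITION & SPEC =====
-- Pre_ is exactly A's termination set: for num < 0, or num ≥ 0 with num*multiplier+carry < 0,
-- Python A loops forever (num //= 10 resp. carry = product // 10 gets stuck at -1).
def Pre_multiply_carry (num : Int) (multiplier : Int) (carry : Int) : Prop :=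
  0 ≤ num ∧ 0 ≤ num * multiplier + carry
instance (num : Int) (multiplier : Int) (carry : Int) : Decidable (Pre_multiply_carry num multiplier carry) := by unfold Pre_multiply_carry; infer_instance

def pvWitness_multiply_carry : Int × Int × Int := (3, 4, 5)

-- When num ≥ 1 and total = num*multiplier+carry is positive but has fewer decimal digits than num
-- (reachable only with multiplier ≤ 0 or a large negative carry), A returns total's digit-reversal padded
-- with trailing zeros (A 12 0 3 = 30), while B returns the plain digit-reversal (3), the intended reverse.
def D_multiply_carry (num : Int) (multiplier : Int) (carry : Int) : Prop :=
  1 ≤ num ∧ 1 ≤ num * multiplier + carry ∧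
    num * multiplier + carry < (10 : Int) ^ Nat.log 10 num.toNat
instance (num : Int) (multiplier : Int) (carry : Int) : Decidable (D_multiply_carry num multiplier carry) := by unfold D_multiply_carry; infer_instance

def Spec_multiply_carry (num : Int) (multiplier : Int) (carry : Int) (out : Int) : Prop :=
  ¬ D_multiply_carry num multiplier carry → out = multiply_carry_alt num multiplier carry
instance (num : Int) (multiplier : Int) (carry : Int) (out : Int) : Decidable (Spec_multiply_carry num multiplier carry out) := by unfold Spec_multiply_carry; infer_instance

def pvDiffWitness_multiply_carry : Int × Int × Int := (12, 0, 3)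
def pvDiffWitnessOut_multiply_carry : Int × Int := (30, 3)

-- ===== CLAIM (what is proved, stated in full; the proofs are below) =====
def Claim_unchanged_multiply_carry : Prop := ∀ (num : Int) (multiplier : Int) (carry : Int), Dom_multiply_carry num multiplier carry → Pre_multiply_carry num multiplier carry → Spec_multiply_carry num multiplier carry (multiply_carry num multiplier carry)
def Claim_changed_multiply_carry : Prop := Dom_multiply_carry (pvDiffWitness_multiply_carry.1) (pvDiffWitness_multiply_carry.2.1) (pvDiffWitness_multiply_carry.2.2) ∧ Pre_multiply_carry (pvDiffWitness_multiply_carry.1) (pvDiffWitness_multiply_carry.2.1) (pvDiffWitness_multiply_carry.2.2) ∧ D_multiply_carry (pvDiffWitness_multiply_carry.1) (pvDiffWitness_multiply_carry.2.1) (pvDiffWitness_multiply_carry.2.2) ∧ multiply_carry (pvDiffWitness_multiply_carry.1) (pvDiffWitness_multiply_carry.2.1) (pvDiffWitness_multiply_carry.2.2) = pvDiffWitnessOut_multiply_carry.1 ∧ multiply_carry_alt (pvDiffWitness_multiply_carry.1) (pvDiffWitness_multiply_carry.2.1) (pvDiffWitness_multiply_carry.2.2) = pvDiffWitnessOut_multiply_carry.2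 ∧ pvDiffWitnessOut_multiply_carry.1 ≠ pvDiffWitnessOut_multiply_carry.2
def Claim_exact_multiply_carry : Prop := ∀ (num : Int) (multiplier : Int) (carry : Int), Dom_multiply_carry num multiplier carry → Pre_multiply_carry num multiplier carry → D_multiply_carry num multiplier carry → multiply_carry num multiplier carry ≠ multiply_carry_alt num multiplier carry

-- ===== LEMMAS AND PROOFS =====

-- Proof-side fused view of B (digit listing composed with the fold); used only in the lemmas.
def mcB_loop : Nat → Int → Int → Int
  | 0, _, result => result
  | fuel+1, total, result =>
    if total ≠ 0 then
      mcB_loop fuel (PySem.Int.floordiv total 10) (result * 10 + PySem.Int.mod total 10)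
    else result

-- Folding the digit list equals the fused loop (fold fusion).
lemma mcB_fuse : ∀ (f : Nat) (t acc : Int),
    (mcB_digits f t).foldl (fun result d => result * 10 + d) acc = mcB_loop f t acc := by
  intro f
  induction f with
  | zero => intro t acc; rfl
  | succ f ih =>
    intro t acc
    rw [mcB_digits, mcB_loop]
    by_cases ht : t ≠ 0
    · rw [if_pos ht, if_pos ht]
      simp only [List.foldl_cons, ih]
    · simp [ht]

lemma mcB_loop_zero (f : Nat) (acc : Int) : mcB_loop f 0 acc = acc := by
  cases f <;> simp [mcB_loop]

-- The key simulation: under the (preserved) invariant, A's fused loop computes exactly the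
-- digit-reversal of total = num*multiplier+carry, step for step with the same fuel.
lemma loop_eq : ∀ (f : Nat) (num multiplier carry acc : Int),
    0 ≤ num → 0 ≤ num * multiplier + carry →
    (num = 0 ∨ (10 : Int) ^ Nat.log 10 num.toNat ≤ num * multiplier + carry ∨
      (num * multiplier + carry = 0 ∧ acc = 0)) →
    mcA_loop f num multiplier carry acc = mcB_loop f (num * multiplier + carry) acc := by
  intro f
  induction f with
  | zero => intro num multiplier carry acc _ _ _; rfl
  | succ f ih =>
    intro num multiplier carry acc hnum ht hinv
    set t := num * multiplier + carry with htdef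
    -- decompose: t = 10 * (num/10 * multiplier) + product
    have hmod : PySem.Int.mod num 10 = num % 10 := PySem.Int.mod_eq_emod_of_pos (by norm_num)
    have hdiv : PySem.Int.floordiv num 10 = num / 10 := PySem.Int.floordiv_eq_ediv_of_pos (by norm_num)
    have hpmod : ∀ a : Int, PySem.Int.mod a 10 = a % 10 := fun a => PySem.Int.mod_eq_emod_of_pos (by norm_num)
    have hpdiv : ∀ a : Int, PySem.Int.floordiv a 10 = a / 10 := fun a => PySem.Int.floordiv_eq_ediv_of_pos (by norm_num)
    have hnummod : num % 10 = num - 10 * (num / 10) := by omega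
    have hprod : (num % 10) * multiplier + carry = t - 10 * (num / 10 * multiplier) := by
      rw [hnummod, htdef]; ring
    by_cases hcond : num ≠ 0 ∨ carry ≠ 0
    · -- A takes a step
      have htpos : t ≠ 0 ∨ (t = 0 ∧ acc = 0) := by
        rcases hinv with h0 | hge | hz
        · subst h0; left; simpa using by omega
        · left
          have : (0:Int) < (10 : Int) ^ Nat.log 10 num.toNat := by positivity
          omega
        · right; exact hz
      rcases htpos with htne | ⟨htz, haccz⟩
      · -- both loops step; same digit, totals track
        have hBcond : t ≠ 0 := htne
        rw [mcA_loop, mcB_loop]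
        simp only [hcond, hBcond, if_pos, ne_eq, not_false_eq_true]
        have hdigit : PySem.Int.mod ((PySem.Int.mod num 10) * multiplier + carry) 10 = PySem.Int.mod t 10 := by
          rw [hmod, hpmod, hpmod, hprod]; omega
        have hcarry' : (PySem.Int.floordiv num 10) * multiplier +
            PySem.Int.floordiv ((PySem.Int.mod num 10) * multiplier + carry) 10 = PySem.Int.floordiv t 10 := by
          rw [hmod, hdiv, hpdiv, hpdiv, hprod]; omega
        have hnum' : 0 ≤ PySem.Int.floordiv num 10 := by rw [hdiv]; omega
        have ht' : 0 ≤ (PySem.Int.floordiv num 10) * multiplier +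
            PySem.Int.floordiv ((PySem.Int.mod num 10) * multiplier + carry) 10 := by
          rw [hcarry', hpdiv]; omega
        have hinv' : PySem.Int.floordiv num 10 = 0 ∨
            (10 : Int) ^ Nat.log 10 (PySem.Int.floordiv num 10).toNat ≤
              (PySem.Int.floordiv num 10) * multiplier +
                PySem.Int.floordiv ((PySem.Int.mod num 10) * multiplier + carry) 10 ∨
            ((PySem.Int.floordiv num 10) * multiplier +
                PySem.Int.floordiv ((PySem.Int.mod num 10) * multiplier + carry) 10 = 0 ∧
              acc * 10 + PySem.Int.mod ((PySem.Int.mod num 10) * multiplier + carry) 10 = 0) := by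
          by_cases hq : PySem.Int.floordiv num 10 = 0
          · exact Or.inl hq
          · -- num ≥ 10, so the digit-count bound drops by one in lockstep
            right; left
            have hq10 : 10 ≤ num := by rw [hdiv] at hq; omega
            have hge : (10 : Int) ^ Nat.log 10 num.toNat ≤ t := by
              rcases hinv with h0 | h | hz
              · omega
              · exact h
              · omega
            have hLpos : 0 < Nat.log 10 num.toNat := Nat.log_pos (by norm_num) (by omega)
            have hlog : Nat.log 10 (PySem.Int.floordiv num 10).toNat = Nat.log 10 num.toNat - 1 := by
              have : (PySem.Int.floordiv num 10).toNat = num.toNat / 10 := by rw [hdiv]; omega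
              rw [this, Nat.log_div_base]
            rw [hcarry', hlog, hpdiv]
            have hpow : (10 : Int) ^ (Nat.log 10 num.toNat - 1) * 10 = (10 : Int) ^ Nat.log 10 num.toNat := by
              rw [← pow_succ]
              congr 1
              omega
            have := hge
            rw [← hpow] at this
            omega
        have := ih (PySem.Int.floordiv num 10) multiplier
          ((PySem.Int.floordiv ((PySem.Int.mod num 10) * multiplier + carry) 10))
          (acc * 10 + PySem.Int.mod ((PySem.Int.mod num 10) * multiplier + carry) 10)
          hnum' ht' hinv'
        rw [this, hcarry', hdigit]
      · -- t = 0, acc = 0: A pads zeros onto acc = 0 forever, B returns 0 at once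
        subst haccz
        rw [mcB_loop]
        simp only [htz, ne_eq, not_true_eq_false, ite_false]
        rw [mcA_loop]
        simp only [hcond, if_pos]
        have hdigit : PySem.Int.mod ((PySem.Int.mod num 10) * multiplier + carry) 10 = 0 := by
          rw [hmod, hpmod, hprod, htz]; omega
        have hcarry' : (PySem.Int.floordiv num 10) * multiplier +
            PySem.Int.floordiv ((PySem.Int.mod num 10) * multiplier + carry) 10 = 0 := by
          rw [hmod, hdiv, hpdiv, hprod, htz]; omega
        have hnum' : 0 ≤ PySem.Int.floordiv num 10 := by rw [hdiv]; omega
        have := ih (PySem.Int.floordiv num 10) multiplier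
          ((PySem.Int.floordiv ((PySem.Int.mod num 10) * multiplier + carry) 10))
          (0 * 10 + PySem.Int.mod ((PySem.Int.mod num 10) * multiplier + carry) 10)
          hnum' (by rw [hcarry']) (Or.inr (Or.inr ⟨hcarry', by rw [hdigit]; ring⟩))
        rw [this, hcarry', mcB_loop_zero, hdigit]; norm_num
    · -- A stops: num = 0 and carry = 0, so t = 0 and B stops too
      push Not at hcond
      obtain ⟨h0, hc0⟩ := hcond
      have : t = 0 := by rw [htdef, h0]; ring_nf; exact hc0
      rw [mcA_loop, this, mcB_loop_zero]
      simp [h0, hc0]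


lemma mcA_loop_done (f : Nat) (multiplier acc : Int) : mcA_loop f 0 multiplier 0 acc = acc := by
  cases f <;> simp [mcA_loop]

-- Inside the padding regime (total has fewer decimal digits than num), A's last appended digit is 0.
lemma mcA_pad : ∀ (f : Nat) (num multiplier carry acc : Int),
    1 ≤ num → 0 ≤ num * multiplier + carry →
    num * multiplier + carry < (10 : Int) ^ Nat.log 10 num.toNat →
    num.toNat < 10 ^ f →
    (mcA_loop f num multiplier carry acc) % 10 = 0 := by
  intro f
  induction f with
  | zero => intro num _ _ _ h1 _ _ hf; simp at hf; omega
  | succ f ih =>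
    intro num multiplier carry acc h1 ht htlt hf
    set t := num * multiplier + carry with htdef
    have hpmod : ∀ a : Int, PySem.Int.mod a 10 = a % 10 := fun a => PySem.Int.mod_eq_emod_of_pos (by norm_num)
    have hpdiv : ∀ a : Int, PySem.Int.floordiv a 10 = a / 10 := fun a => PySem.Int.floordiv_eq_ediv_of_pos (by norm_num)
    have hnummod : num % 10 = num - 10 * (num / 10) := by omega
    have hprod : (num % 10) * multiplier + carry = t - 10 * (num / 10 * multiplier) := by
      rw [hnummod, htdef]; ring
    have hcond : num ≠ 0 ∨ carry ≠ 0 := Or.inl (by omega)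
    rw [mcA_loop, if_pos hcond]
    have hcarry' : (PySem.Int.floordiv num 10) * multiplier +
        PySem.Int.floordiv ((PySem.Int.mod num 10) * multiplier + carry) 10 = t / 10 := by
      rw [hpmod, hpdiv, hpdiv, hprod]; omega
    by_cases hq : num / 10 = 0
    · -- num is a single digit: t < 10^0 = 1, so t = 0; one padding step, then the loop halts
      have hL : Nat.log 10 num.toNat = 0 :=
        Nat.log_eq_zero_iff.mpr (Or.inl (by omega))
      rw [hL] at htlt
      have htz : t = 0 := by simpa using by omega
      have hdigit : PySem.Int.mod ((PySem.Int.mod num 10) * multiplier + carry) 10 = 0 := by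
        rw [hpmod, hpmod, hprod, htz]; omega
      have hnum' : PySem.Int.floordiv num 10 = 0 := by rw [hpdiv]; exact hq
      have hcarry0 : PySem.Int.floordiv ((PySem.Int.mod num 10) * multiplier + carry) 10 = 0 := by
        have h := hcarry'
        rw [hnum', htz] at h
        simpa using h
      simp only [hdigit, hnum', hcarry0, mcA_loop_done]
      omega
    · -- num has more digits: recurse, the bound drops by one in lockstep
      have hq1 : 10 ≤ num := by omega
      have hLpos : 0 < Nat.log 10 num.toNat := Nat.log_pos (by norm_num) (by omega)
      have hlog : Nat.log 10 ((num / 10).toNat) = Nat.log 10 num.toNat - 1 := by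
        have h : (num / 10).toNat = num.toNat / 10 := by omega
        rw [h, Nat.log_div_base]
      have hpow : (10 : Int) ^ (Nat.log 10 num.toNat - 1) * 10 = (10 : Int) ^ Nat.log 10 num.toNat := by
        rw [← pow_succ]; congr 1; omega
      have ht' : 0 ≤ (num / 10) * multiplier + ((num % 10) * multiplier + carry) / 10 := by
        have : (num / 10) * multiplier + ((num % 10) * multiplier + carry) / 10 = t / 10 := by
          rw [hprod]; omega
        rw [this]; omega
      have htlt' : (num / 10) * multiplier + ((num % 10) * multiplier + carry) / 10 <
          (10 : Int) ^ Nat.log 10 ((num / 10).toNat) := by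
        have heq : (num / 10) * multiplier + ((num % 10) * multiplier + carry) / 10 = t / 10 := by
          rw [hprod]; omega
        rw [heq, hlog]
        rw [← hpow] at htlt
        omega
      have hf' : (num / 10).toNat < 10 ^ f := by
        have h : (num / 10).toNat = num.toNat / 10 := by omega
        have : 10 ^ (f + 1) = 10 ^ f * 10 := by rw [pow_succ]
        omega
      have := ih (num / 10) multiplier (((num % 10) * multiplier + carry) / 10)
        (acc * 10 + PySem.Int.mod ((PySem.Int.mod num 10) * multiplier + carry) 10)
        (by omega) ht' htlt' hf'
      simpa [hpdiv, hpmod] using this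

-- B's result ends in total's leading decimal digit, which is nonzero when total ≥ 1.
lemma mcB_last_digit : ∀ (f : Nat) (t acc : Int), 1 ≤ t → t.toNat < 10 ^ f →
    (mcB_loop f t acc) % 10 ≠ 0 := by
  intro f
  induction f with
  | zero => intro t _ h1 hf; simp at hf; omega
  | succ f ih =>
    intro t acc h1 hf
    have hpmod : ∀ a : Int, PySem.Int.mod a 10 = a % 10 := fun a => PySem.Int.mod_eq_emod_of_pos (by norm_num)
    have hpdiv : ∀ a : Int, PySem.Int.floordiv a 10 = a / 10 := fun a => PySem.Int.floordiv_eq_ediv_of_pos (by norm_num)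
    have hcond : t ≠ 0 := by omega
    rw [mcB_loop, if_pos hcond]
    by_cases hq : t / 10 = 0
    · have h9 : t ≤ 9 := by omega
      simp only [hpdiv, hpmod, hq, mcB_loop_zero]
      omega
    · have hf' : (t / 10).toNat < 10 ^ f := by
        have : 10 ^ (f + 1) = 10 ^ f * 10 := by rw [pow_succ]
        omega
      have := ih (t / 10) (acc * 10 + t % 10) (by omega) hf'
      simpa [hpdiv, hpmod] using this

-- ===== VERDICT (by name: the statement is the Claim_ definition above) =====
theorem multiply_carry_spec : Claim_unchanged_multiply_carry := by
  intro num multiplier carry _hdom hpre hnD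
  obtain ⟨h1, h2⟩ := hpre
  unfold multiply_carry multiply_carry_alt
  rw [mcB_fuse]
  apply loop_eq 64 num multiplier carry 0 h1 h2
  unfold D_multiply_carry at hnD
  push Not at hnD
  by_cases hz : num = 0
  · exact Or.inl hz
  · by_cases htz : num * multiplier + carry = 0
    · exact Or.inr (Or.inr ⟨htz, rfl⟩)
    · exact Or.inr (Or.inl (hnD (by omega) (by omega)))

theorem multiply_carry_changed : Claim_changed_multiply_carry := by
  unfold Claim_changed_multiply_carry; decide

theorem multiply_carry_tight : Claim_exact_multiply_carry := by
  intro num multiplier carry hdom hpre hD heq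
  obtain ⟨hd1, hd2⟩ := hpre
  obtain ⟨h1, h2, h3⟩ := hD
  unfold Dom_multiply_carry at hdom
  simp only [pvDomInt, Bool.and_eq_true, decide_eq_true_eq] at hdom
  have hnumbd : num.toNat < 10 ^ 64 := by
    have : (10 : Nat) ^ 64 = 10 ^ 64 := rfl
    have hb : num.toNat ≤ 2147483648 := by omega
    calc num.toNat ≤ 2147483648 := hb
      _ < 10 ^ 64 := by norm_num
  have hL9 : Nat.log 10 num.toNat ≤ 9 := by
    calc Nat.log 10 num.toNat ≤ Nat.log 10 2147483648 := Nat.log_mono_right (by omega)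
      _ ≤ 9 := by decide
  have htbd : (num * multiplier + carry).toNat < 10 ^ 64 := by
    have hp : num * multiplier + carry < (10 : Int) ^ Nat.log 10 num.toNat := h3
    have : (10 : Int) ^ Nat.log 10 num.toNat ≤ (10 : Int) ^ 9 :=
      pow_le_pow_right₀ (by norm_num) hL9
    have h9 : num * multiplier + carry < (10 : Int) ^ 9 := lt_of_lt_of_le hp this
    have : ((10 : Int) ^ 9) = 1000000000 := by norm_num
    omega
  have hA : (multiply_carry num multiplier carry) % 10 = 0 :=
    mcA_pad 64 num multiplier carry 0 h1 hd2 h3 hnumbd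
  have hB : (multiply_carry_alt num multiplier carry) % 10 ≠ 0 := by
    unfold multiply_carry_alt
    rw [mcB_fuse]
    exact mcB_last_digit 64 (num * multiplier + carry) 0 h2 htbd
  rw [heq] at hA
  exact hB hA
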